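-- pv_equiv track=rewrite | github.com/olimjonsharipovv/python-homeworks | lesson-4/homework/homeworks.py | insert_underscores
-- ===== SOURCE A (Python) =====
-- def insert_underscores(txt):
--     vowels = "aeiouAEIOU"
--     result = []
--     i = 0
--     while i < len(txt):
--         result.append(txt[i])
--
--         if (i + 1 < len(txt)) and (txt[i] in vowels or (i > 0 and result[-1] == '_')):
--             pass
--         elif (i + 1) % 3 == 0 and (i + 1) != len(txt):
--             result.append('_')
--         i += 1
--     return ''.join(result)
-- ===== SOURCE B (Python) =====
-- def insert_underscores(txt):
--     out = []
--     rest = txt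
--     while len(rest) > 3:
--         head, rest = rest[:3], rest[3:]
--         out.append(head)
--         if head[-1] not in "aeiouAEIOU_":
--             out.append('_')
--     out.append(rest)
--     return ''.join(out)
-- ===== Notes on version B (the rewrite author's own statement) =====
-- stated objective: alternative
-- what changed: Replaces A's per-character index loop with its (i+1)%3 modulus test and result[-1] inspection by a while loop that repeatedly slices off a 3-character chunk of the remaining string and appends a separator unless the chunk's last character is a vowel or an underscore; it trades A's linear indexing for chunk slicing, which copies the remaining tail each step and is slower on very large inputs.
import Mathlib
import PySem

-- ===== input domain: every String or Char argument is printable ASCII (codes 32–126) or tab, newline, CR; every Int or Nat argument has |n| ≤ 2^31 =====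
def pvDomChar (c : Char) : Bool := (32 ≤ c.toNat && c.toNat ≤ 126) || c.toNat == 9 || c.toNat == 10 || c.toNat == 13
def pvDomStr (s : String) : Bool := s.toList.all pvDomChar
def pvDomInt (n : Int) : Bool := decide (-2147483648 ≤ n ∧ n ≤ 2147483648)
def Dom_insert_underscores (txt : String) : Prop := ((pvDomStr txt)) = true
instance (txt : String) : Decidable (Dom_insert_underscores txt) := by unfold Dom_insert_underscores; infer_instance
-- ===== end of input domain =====

-- B replaces A's per-character index loop (with its (i+1)%3 test) by a while loop that
-- consumes the string three characters at a time; same return value, objective: alternative.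

-- ===== PORT A =====
-- vowels = "aeiouAEIOU"
def aVowels : List Char := "aeiouAEIOU".toList

-- the while loop of A: i is the index, `result` the accumulated character list;
-- result.append(txt[i]) is `result ++ [t[i]]`, result[-1] is the last of that.
def aLoop (t : List Char) (i : Nat) (result : List Char) : List Char :=
  if h : i < t.length then
    if (i + 1 < t.length) ∧ (t[i] ∈ aVowels ∨ (0 < i ∧ (result ++ [t[i]]).getLast? = some '_')) then
      aLoop t (i + 1) (result ++ [t[i]])
    else if (i + 1) % 3 = 0 ∧ (i + 1) ≠ t.length then
      aLoop t (i + 1) (result ++ [t[i]] ++ ['_'])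
    else
      aLoop t (i + 1) (result ++ [t[i]])
  else result
termination_by t.length - i

def insert_underscores (txt : String) : String :=
  String.mk (aLoop txt.toList 0 [])

-- ===== PORT B =====
def bStop : List Char := "aeiouAEIOU_".toList

-- B's while loop: while len(rest) > 3 split off head = rest[:3] (slice with literal
-- nonnegative bounds = take/drop, exact), append head, and append '_' unless
-- head[-1] (= pyGetD head (-1), head is never empty here) is a vowel or '_'.
def bLoop (rest : List Char) (out : List (List Char)) : List (List Char) :=
  if 3 < rest.length then
    if PySem.List.pyGetD (rest.take 3) (-1) ' ' ∈ bStop then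
      bLoop (rest.drop 3) (out ++ [rest.take 3])
    else
      bLoop (rest.drop 3) (out ++ [rest.take 3] ++ [['_']])
  else out ++ [rest]
termination_by rest.length
decreasing_by all_goals simp; omega

def insert_underscores_alt (txt : String) : String :=
  String.mk (bLoop txt.toList []).flatten

-- ===== PRECONDITION & SPEC =====
def Spec_insert_underscores (txt : String) (out : String) : Prop := out = insert_underscores_alt txt
instance (txt : String) (out : String) : Decidable (Spec_insert_underscores txt out) := by unfold Spec_insert_underscores; infer_instance

-- ===== CLAIM (what is proved, stated in full; the proofs are below) =====
def Claim_equal_insert_underscores : Prop := ∀ (txt : String), Dom_insert_underscores txt → Spec_insert_underscores txt (insert_underscores txt)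

-- ===== LEMMAS AND PROOFS =====

-- A's loop only appends to `result`: the accumulator factors out.
theorem aLoop_factor (t : List Char) (i : Nat) (r : List Char) :
    aLoop t i r = r ++ aLoop t i [] := by
  rw [aLoop, aLoop]
  by_cases h : i < t.length
  · simp only [dif_pos h, List.getLast?_concat, List.getLast?_singleton, List.nil_append]
    split_ifs with h1 h2
    · rw [aLoop_factor t (i+1) (r ++ [t[i]]), aLoop_factor t (i+1) [t[i]]]
      simp
    · rw [aLoop_factor t (i+1) (r ++ [t[i]] ++ ['_']), aLoop_factor t (i+1) ([t[i]] ++ ['_'])]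
      simp
    · rw [aLoop_factor t (i+1) (r ++ [t[i]]), aLoop_factor t (i+1) [t[i]]]
      simp
  · simp [dif_neg h]
termination_by t.length - i

-- B's loop only appends to `out`.
theorem bLoop_factor (rest : List Char) (out : List (List Char)) :
    bLoop rest out = out ++ bLoop rest [] := by
  conv_lhs => rw [bLoop]
  conv_rhs => rw [bLoop]
  by_cases h : 3 < rest.length
  · simp only [if_pos h, List.nil_append]
    split_ifs with h1
    · rw [bLoop_factor (rest.drop 3) (out ++ [rest.take 3]),
          bLoop_factor (rest.drop 3) [rest.take 3]]
      simp
    · rw [bLoop_factor (rest.drop 3) (out ++ [rest.take 3] ++ [['_']]),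
          bLoop_factor (rest.drop 3) ([rest.take 3] ++ [['_']])]
      simp
  · simp [if_neg h]
termination_by rest.length
decreasing_by all_goals simp; omega

theorem aLoop_done (t : List Char) (i : Nat) (r : List Char) (h : t.length ≤ i) :
    aLoop t i r = r := by
  rw [aLoop]; simp [Nat.not_lt.mpr h]

-- A step of A's loop that appends no underscore: at indices where (i+1)%3 ≠ 0 or i+1 = len.
theorem aLoop_step (t : List Char) (i : Nat) (r : List Char) (h : i < t.length)
    (hk : (i + 1) % 3 ≠ 0 ∨ (i + 1) = t.length) :
    aLoop t i r = aLoop t (i + 1) (r ++ [t[i]]) := by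
  rw [aLoop]
  simp only [dif_pos h]
  split_ifs with h1 h2
  · rfl
  · exact absurd h2 (by tauto)
  · rfl

-- The underscore step: at index i+2 with i % 3 = 0 and i + 3 < len, A appends t[i+2]
-- and then '_' exactly when t[i+2] is neither a vowel nor '_'.
theorem aLoop_step3 (t : List Char) (i : Nat) (r : List Char)
    (hm : i % 3 = 0) (hlt : i + 3 < t.length) :
    aLoop t (i + 2) r =
      (if t[i+2] ∈ bStop then r ++ [t[i+2]] else r ++ [t[i+2]] ++ ['_'])
        ++ aLoop t (i + 3) [] := by
  have h2 : i + 2 < t.length := by omega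
  rw [aLoop]
  simp only [dif_pos h2, List.getLast?_concat]
  have hsplit : bStop = aVowels ++ ['_'] := by decide
  have hcond : ((i + 2) + 1 < t.length ∧
      (t[i+2] ∈ aVowels ∨ (0 < i + 2 ∧ (some t[i+2] : Option Char) = some '_')))
      ↔ t[i+2] ∈ bStop := by
    simp [hsplit, (by omega : 0 < i + 2), (by omega : i + 2 + 1 < t.length)]
  by_cases hc : t[i+2] ∈ bStop
  · rw [if_pos hc, if_pos (hcond.mpr hc), aLoop_factor]
  · rw [if_neg hc, if_neg (fun hA => hc (hcond.mp hA)),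
        if_pos (⟨by omega, by omega⟩ : ((i+2)+1) % 3 = 0 ∧ (i+2)+1 ≠ t.length),
        aLoop_factor]

-- chunk view of a drop: t.drop i = t[i] :: t[i+1] :: t[i+2] :: t.drop (i+3)
theorem drop_three (t : List Char) (i : Nat) (h : i + 3 ≤ t.length) :
    t.drop i = t[i]'(by omega) :: t[i+1]'(by omega) :: t[i+2]'(by omega) :: t.drop (i + 3) := by
  rw [List.drop_eq_getElem_cons (by omega : i < t.length),
      List.drop_eq_getElem_cons (by omega : i + 1 < t.length),
      List.drop_eq_getElem_cons (by omega : i + 2 < t.length)]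

-- a tail of at most three characters is copied verbatim by A's loop
theorem aLoop_small (t : List Char) (i : Nat) (hm : i % 3 = 0) (hle : i ≤ t.length)
    (hsm : t.length ≤ i + 3) : aLoop t i [] = t.drop i := by
  by_cases e0 : t.length ≤ i
  · rw [aLoop_done _ _ _ e0, List.drop_of_length_le e0]
  · have h0 : i < t.length := by omega
    rw [aLoop_step t i [] h0 (Or.inl (by omega))]
    by_cases e1 : t.length ≤ i + 1
    · rw [aLoop_done _ _ _ e1, List.drop_eq_getElem_cons h0,
          List.drop_of_length_le e1]
      simp
    · have h1 : i + 1 < t.length := by omega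
      rw [aLoop_step t (i+1) _ h1 (Or.inl (by omega))]
      by_cases e2 : t.length ≤ i + 2
      · rw [aLoop_done _ _ _ e2, List.drop_eq_getElem_cons h0,
            List.drop_eq_getElem_cons h1, List.drop_of_length_le e2]
        simp
      · have h2 : i + 2 < t.length := by omega
        rw [aLoop_step t (i+2) _ h2 (Or.inr (by omega)),
            aLoop_done _ _ _ (by omega : t.length ≤ i + 3),
            drop_three t i (by omega), List.drop_of_length_le (by omega : t.length ≤ i + 3)]
        simp

-- pyGetD [a,b,c] (-1) is the last element
theorem pyGetD_three_neg_one (a b c d : Char) :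
    PySem.List.pyGetD [a, b, c] (-1) d = c := by
  rw [PySem.List.pyGetD_neg_one ([a,b,c]) d (by simp)]
  simp

-- Main invariant: from any chunk boundary, A's tail output is B's output on the rest.
theorem main_inv (t : List Char) (i : Nat) (hm : i % 3 = 0) (hle : i ≤ t.length) :
    aLoop t i [] = (bLoop (t.drop i) []).flatten := by
  by_cases hbig : i + 3 < t.length
  · have h0 : i < t.length := by omega
    have h1 : i + 1 < t.length := by omega
    rw [aLoop_step t i [] h0 (Or.inl (by omega)),
        aLoop_step t (i+1) _ h1 (Or.inl (by omega)),
        aLoop_step3 t i _ hm hbig,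
        main_inv t (i+3) (by omega) (by omega)]
    have htake : (t.drop i).take 3 = [t[i], t[i+1], t[i+2]] := by
      rw [drop_three t i (by omega)]; rfl
    have hdd : (t.drop i).drop 3 = t.drop (i + 3) := by
      rw [List.drop_drop]
    conv_rhs => rw [bLoop]
    rw [if_pos (by simp; omega : 3 < (t.drop i).length), htake, hdd,
        pyGetD_three_neg_one]
    by_cases hc : t[i+2] ∈ bStop
    · rw [if_pos hc, if_pos hc]
      conv_rhs => rw [bLoop_factor]
      simp
    · rw [if_neg hc, if_neg hc]
      conv_rhs => rw [bLoop_factor]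
      simp
  · rw [aLoop_small t i hm hle (by omega)]
    conv_rhs => rw [bLoop]
    rw [if_neg (by simp; omega : ¬ 3 < (t.drop i).length)]
    simp
termination_by t.length - i

-- ===== VERDICT (by name: the statement is the Claim_ definition above) =====
theorem insert_underscores_spec : Claim_equal_insert_underscores := by
  intro txt _
  unfold Spec_insert_underscores insert_underscores insert_underscores_alt
  rw [main_inv txt.toList 0 rfl (Nat.zero_le _), List.drop_zero]
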